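-- pv_equiv track=rewrite | github.com/VeyC/Instruct-SQL | src/util.py | process_redundant_columns
-- ===== SOURCE A (Python) =====
-- def process_redundant_columns(columns_used, table_names_only, consistency_redundant_columns, inconsistency_redundant_columns):
--     """
--     处理冗余列，将匹配的列和表名添加到现有集合中
--
--     Args:
--         columns_used (set): 当前使用的列名集合
--         table_names_only (set): 当前使用的表名集合
--         consistency_redundant_columns (list): 一致性冗余列列表
--         inconsistency_redundant_columns (list): 不一致性冗余列列表
--
--     Returns:
--         tuple: 更新后的 (columns_used, table_names_only)
--     """
--
--     def remove_symbols(text):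
--         """去除所有引号和反引号符号"""
--         return text.replace('"', '').replace('`', '')
--
--     # 复制原始集合
--     updated_columns = columns_used.copy()
--     updated_tables = table_names_only.copy()
--
--     # 创建当前表列组合（去除符号）
--     current_combinations = set()
--     for table in table_names_only:
--         for column in columns_used:
--             clean_table = remove_symbols(table)
--             clean_column = remove_symbols(column)
--             current_combinations.add(f"{clean_table}.{clean_column}")
--
--     # 处理所有冗余列
--     all_redundant_columns = consistency_redundant_columns + inconsistency_redundant_columns
--
--     for redundant_group in all_redundant_columns:
--         if len(redundant_group) >= 2:
--             # 检查第一个和第二个位置的元素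
--             first_clean = remove_symbols(redundant_group[0])
--             second_clean = remove_symbols(redundant_group[1])
--
--             # 如果当前组合匹配第一个或第二个位置
--             if first_clean in current_combinations or second_clean in current_combinations:
--                 # 将整个冗余组的表名和列名都加入
--                 for redundant_item in redundant_group:
--                     clean_item = remove_symbols(redundant_item)
--                     if '.' in clean_item:
--                         table_part, column_part = clean_item.split('.', 1)
--                         # 添加表名和列名（如果不存在）
--                         if table_part not in updated_tables:
--                             updated_tables.add(table_part)
--                         if column_part not in updated_columns:  # 保持原有格式
--                             updated_columns.add(column_part)
--
--     return updated_columns, updated_tables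
-- ===== SOURCE B (Python) =====
-- def process_redundant_columns(columns_used, table_names_only, consistency_redundant_columns, inconsistency_redundant_columns):
--     """Same result as A, but without building the |tables|x|columns| product set:
--     precompute the cleaned table-name and column-name sets once and test each
--     redundant string by scanning its '.' split points."""
--
--     def remove_symbols(text):
--         return text.replace('"', '').replace('`', '')
--
--     clean_tables = {remove_symbols(t) for t in table_names_only}
--     clean_columns = {remove_symbols(c) for c in columns_used}
--
--     def matches(s):
--         # s is in A's current_combinations iff it splits at some '.' into a
--         # cleaned table name followed by a cleaned column name.
--         pre, rest = '', s
--         while rest: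
--             ch, rest = rest[0], rest[1:]
--             if ch == '.' and pre in clean_tables and rest in clean_columns:
--                 return True
--             pre += ch
--         return False
--
--     updated_columns = columns_used.copy()
--     updated_tables = table_names_only.copy()
--
--     for redundant_group in consistency_redundant_columns + inconsistency_redundant_columns:
--         if len(redundant_group) >= 2:
--             if matches(remove_symbols(redundant_group[0])) or matches(remove_symbols(redundant_group[1])):
--                 for redundant_item in redundant_group:
--                     clean_item = remove_symbols(redundant_item)
--                     if '.' in clean_item:
--                         table_part, column_part = clean_item.split('.', 1)
--                         if table_part not in updated_tables:
--                             updated_tables.add(table_part)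
--                         if column_part not in updated_columns:
--                             updated_columns.add(column_part)
--     return updated_columns, updated_tables
-- ===== Notes on version B (the rewrite author's own statement) =====
-- stated objective: faster
-- what changed: B replaces A's precomputed |tables|x|columns| product set of 'table.column' strings with two cleaned name sets built once, testing each redundant string by membership of its prefix/suffix at each '.' split point.
import Mathlib
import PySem

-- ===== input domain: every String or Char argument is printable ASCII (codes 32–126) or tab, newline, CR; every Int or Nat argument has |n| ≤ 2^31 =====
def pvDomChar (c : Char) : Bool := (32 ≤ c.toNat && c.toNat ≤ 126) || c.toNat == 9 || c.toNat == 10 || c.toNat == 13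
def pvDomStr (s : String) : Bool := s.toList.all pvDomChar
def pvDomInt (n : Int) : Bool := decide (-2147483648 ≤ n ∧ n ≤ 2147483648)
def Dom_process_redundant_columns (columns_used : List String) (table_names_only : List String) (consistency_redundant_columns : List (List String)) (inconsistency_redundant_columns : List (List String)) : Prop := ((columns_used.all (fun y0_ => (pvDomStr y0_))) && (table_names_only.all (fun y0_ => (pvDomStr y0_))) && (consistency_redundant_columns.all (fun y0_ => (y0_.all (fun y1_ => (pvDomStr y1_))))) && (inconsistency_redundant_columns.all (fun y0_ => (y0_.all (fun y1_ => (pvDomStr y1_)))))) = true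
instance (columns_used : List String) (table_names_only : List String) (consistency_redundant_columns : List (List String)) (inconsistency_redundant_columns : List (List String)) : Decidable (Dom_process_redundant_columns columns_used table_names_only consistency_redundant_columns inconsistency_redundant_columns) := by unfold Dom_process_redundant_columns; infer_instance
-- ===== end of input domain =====

-- B avoids building A's |tables|×|columns| product set: it precomputes the cleaned
-- table-name and column-name sets once and tests each redundant string by scanning
-- its '.' split points (objective: faster, asymptotic).

-- ===== PORT A =====
-- remove_symbols: text.replace('"','').replace('`','')  (shared helper, identical in Source A and Source B)
def pvClean (s : List Char) : List Char :=
  PySem.Chars.replace (PySem.Chars.replace s ['"'] []) ['`'] []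

-- the inner "add the group's table/column parts" loop, identical code in Source A and Source B
def pvAddGroup (st : List String × List String) (g : List String) : List String × List String :=
  g.foldl (fun st item =>
    let ci := pvClean item.toList
    if PySem.Chars.isIn ['.'] ci then
      let parts := PySem.Chars.splitOnMax ci ['.'] 1
      let tpart := String.ofList (parts.getD 0 [])
      let cpart := String.ofList (parts.getD 1 [])
      let tabs := if PySem.Set.contains st.2 tpart then st.2 else PySem.Set.add st.2 tpart
      let cols := if PySem.Set.contains st.1 cpart then st.1 else PySem.Set.add st.1 cpart
      (cols, tabs)
    else st) st

def process_redundant_columns (columns_used : List String) (table_names_only : List String) (consistency_redundant_columns : List (List String)) (inconsistency_redundant_columns : List (List String)) : List String × List String :=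
  -- current_combinations: set of f"{clean_table}.{clean_column}" over the table×column product
  let combos : PySem.Set (List Char) :=
    table_names_only.foldl (fun acc table =>
      columns_used.foldl (fun acc column =>
        PySem.Set.add acc (pvClean table.toList ++ '.' :: pvClean column.toList)) acc) []
  (consistency_redundant_columns ++ inconsistency_redundant_columns).foldl (fun st g =>
    if 2 ≤ g.length then
      let fc := pvClean (g.getD 0 "").toList
      let sc := pvClean (g.getD 1 "").toList
      if PySem.Set.contains combos fc || PySem.Set.contains combos sc then pvAddGroup st g
      else st
    else st) (columns_used, table_names_only)

-- ===== PORT B =====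
-- matches(s): walk s once; at each '.' test prefix ∈ clean_tables and suffix ∈ clean_columns
def pvMatch (ct cc : PySem.Set (List Char)) (pre rest : List Char) : Bool :=
  match rest with
  | [] => false
  | ch :: rs =>
    (ch == '.' && PySem.Set.contains ct pre && PySem.Set.contains cc rs) ||
      pvMatch ct cc (pre ++ [ch]) rs

def process_redundant_columns_alt (columns_used : List String) (table_names_only : List String) (consistency_redundant_columns : List (List String)) (inconsistency_redundant_columns : List (List String)) : List String × List String :=
  let ct : PySem.Set (List Char) := PySem.Set.ofList (table_names_only.map (fun t => pvClean t.toList))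
  let cc : PySem.Set (List Char) := PySem.Set.ofList (columns_used.map (fun c => pvClean c.toList))
  (consistency_redundant_columns ++ inconsistency_redundant_columns).foldl (fun st g =>
    if 2 ≤ g.length then
      let fc := pvClean (g.getD 0 "").toList
      let sc := pvClean (g.getD 1 "").toList
      if pvMatch ct cc [] fc || pvMatch ct cc [] sc then pvAddGroup st g
      else st
    else st) (columns_used, table_names_only)

-- ===== PRECONDITION & SPEC =====
def Spec_process_redundant_columns (columns_used : List String) (table_names_only : List String) (consistency_redundant_columns : List (List String)) (inconsistency_redundant_columns : List (List String)) (out : List String × List String) : Prop := out = process_redundant_columns_alt columns_used table_names_only consistency_redundant_columns inconsistency_redundant_columns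
instance (columns_used : List String) (table_names_only : List String) (consistency_redundant_columns : List (List String)) (inconsistency_redundant_columns : List (List String)) (out : List String × List String) : Decidable (Spec_process_redundant_columns columns_used table_names_only consistency_redundant_columns inconsistency_redundant_columns out) := by unfold Spec_process_redundant_columns; infer_instance

-- ===== CLAIM (what is proved, stated in full; the proofs are below) =====
def Claim_equal_process_redundant_columns : Prop := ∀ (columns_used : List String) (table_names_only : List String) (consistency_redundant_columns : List (List String)) (inconsistency_redundant_columns : List (List String)), Dom_process_redundant_columns columns_used table_names_only consistency_redundant_columns inconsistency_redundant_columns → Spec_process_redundant_columns columns_used table_names_only consistency_redundant_columns inconsistency_redundant_columns (process_redundant_columns columns_used table_names_only consistency_redundant_columns inconsistency_redundant_columns)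

-- ===== LEMMAS AND PROOFS =====

lemma mem_foldl_add {α β : Type} [BEq α] [LawfulBEq α] (f : β → α) (l : List β)
    (acc : PySem.Set α) (s : α) :
    s ∈ l.foldl (fun acc u => PySem.Set.add acc (f u)) acc ↔ s ∈ acc ∨ ∃ u ∈ l, s = f u := by
  induction l generalizing acc with
  | nil => simp
  | cons x xs ih => simp [ih, PySem.Set.mem_add]; tauto

lemma mem_combos (columns_used table_names_only : List String) (acc : PySem.Set (List Char)) (s : List Char) :
    s ∈ table_names_only.foldl (fun acc table =>
        columns_used.foldl (fun acc column =>
          PySem.Set.add acc (pvClean table.toList ++ '.' :: pvClean column.toList)) acc) acc ↔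
      s ∈ acc ∨ ∃ t ∈ table_names_only, ∃ c ∈ columns_used,
        s = pvClean t.toList ++ '.' :: pvClean c.toList := by
  induction table_names_only generalizing acc with
  | nil => simp
  | cons x xs ih => simp [ih, mem_foldl_add, or_assoc]

lemma pvMatch_iff (ct cc : PySem.Set (List Char)) (pre rest : List Char) :
    pvMatch ct cc pre rest = true ↔
      ∃ p q, rest = p ++ '.' :: q ∧ (pre ++ p) ∈ ct ∧ q ∈ cc := by
  induction rest generalizing pre with
  | nil => simp [pvMatch]
  | cons ch rs ih =>
    simp only [pvMatch, Bool.or_eq_true, Bool.and_eq_true, beq_iff_eq,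
      PySem.Set.contains_iff, ih]
    constructor
    · rintro (⟨⟨hc, hp⟩, hq⟩ | ⟨p, q, hrs, hp, hq⟩)
      · exact ⟨[], rs, by simp [hc], by simpa using hp, hq⟩
      · exact ⟨ch :: p, q, by simp [hrs], by simpa using hp, hq⟩
    · rintro ⟨p, q, heq, hp, hq⟩
      cases p with
      | nil =>
        simp only [List.nil_append, List.cons.injEq] at heq
        obtain ⟨rfl, rfl⟩ := heq
        exact Or.inl ⟨⟨rfl, by simpa using hp⟩, hq⟩
      | cons a p' =>
        simp only [List.cons_append, List.cons.injEq] at heq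
        obtain ⟨rfl, h2⟩ := heq
        exact Or.inr ⟨p', q, h2, by simpa using hp, hq⟩

lemma guard_eq (columns_used table_names_only : List String) (s : List Char) :
    PySem.Set.contains
      (table_names_only.foldl (fun acc table =>
        columns_used.foldl (fun acc column =>
          PySem.Set.add acc (pvClean table.toList ++ '.' :: pvClean column.toList)) acc) []) s
    = pvMatch (PySem.Set.ofList (table_names_only.map (fun t => pvClean t.toList)))
              (PySem.Set.ofList (columns_used.map (fun c => pvClean c.toList))) [] s := by
  rw [Bool.eq_iff_iff, PySem.Set.contains_iff, mem_combos, pvMatch_iff]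
  constructor
  · rintro (h | ⟨t, ht, c, hc, rfl⟩)
    · simp at h
    · refine ⟨pvClean t.toList, pvClean c.toList, by simp, ?_, ?_⟩
      · simp only [PySem.Set.mem_ofList, List.mem_map]
        exact ⟨t, ht, rfl⟩
      · simp only [PySem.Set.mem_ofList, List.mem_map]
        exact ⟨c, hc, rfl⟩
  · rintro ⟨p, q, rfl, hp, hq⟩
    simp only [PySem.Set.mem_ofList, List.mem_map] at hp hq
    obtain ⟨t, ht, rfl⟩ := hp
    obtain ⟨c, hc, rfl⟩ := hq
    exact Or.inr ⟨t, ht, c, hc, by simp⟩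

-- ===== VERDICT (by name: the statement is the Claim_ definition above) =====
theorem process_redundant_columns_spec : Claim_equal_process_redundant_columns := by
  intro columns_used table_names_only c ic _
  unfold Spec_process_redundant_columns
  unfold process_redundant_columns process_redundant_columns_alt
  simp only [guard_eq]
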